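-- pv_equiv track=rewrite | github.com/Casvt/Plex-scripts | playlist_collection/advanced_playlists.py | _create_staggered
-- ===== SOURCE A (Python) =====
-- from typing import TYPE_CHECKING, Dict, List
--
-- def _create_staggered(series_episodes: Dict[int, List[int]]) -> List[int]:
--     episodes = []
--     series_list = list(series_episodes.values())
--     range_list = max([len(l) for l in series_list])
--     for index in range(range_list):
--         for series in series_list:
--             try:
--                 episodes.append(series[index])
--             except IndexError:
--                 pass
--     return episodes
-- ===== SOURCE B (Python) =====
-- from typing import Dict, List
--
-- def _create_staggered(series_episodes: Dict[int, List[int]]) -> List[int]: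
--     decorated = [(position, series_nr, episode)
--                  for series_nr, episodes in enumerate(series_episodes.values())
--                  for position, episode in enumerate(episodes)]
--     decorated.sort(key=lambda t: (t[0], t[1]))
--     return [episode for _position, _series_nr, episode in decorated]
-- ===== Notes on version B (the rewrite author's own statement) =====
-- stated objective: alternative
-- what changed: Replaces A's column-by-column nested scan (try/except on exhausted series) by decorate-sort-undecorate: flatten every episode into a (position, series, episode) triple in one pass, stable-sort by (position, series), and project the episodes.
-- crash fix: On an empty dict A raises ValueError (max() of an empty sequence); B returns []. — e.g. on _create_staggered([]): A raises ValueError, B returns []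
import Mathlib
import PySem

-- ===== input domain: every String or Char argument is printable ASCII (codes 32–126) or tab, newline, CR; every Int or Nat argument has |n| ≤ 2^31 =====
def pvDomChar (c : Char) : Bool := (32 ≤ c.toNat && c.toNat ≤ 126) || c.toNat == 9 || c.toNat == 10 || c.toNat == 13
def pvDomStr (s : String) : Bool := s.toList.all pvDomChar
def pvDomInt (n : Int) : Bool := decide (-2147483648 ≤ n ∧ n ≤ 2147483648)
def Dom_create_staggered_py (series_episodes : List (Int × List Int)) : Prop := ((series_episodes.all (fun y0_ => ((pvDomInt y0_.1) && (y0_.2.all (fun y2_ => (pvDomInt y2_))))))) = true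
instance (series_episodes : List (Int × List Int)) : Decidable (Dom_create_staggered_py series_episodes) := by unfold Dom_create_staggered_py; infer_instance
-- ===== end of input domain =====

-- B replaces A's column-by-column nested scan (try/except on exhausted series) by
-- decorate-sort-undecorate: one pass builds (position, series, episode) triples, a
-- stable sort by (position, series) orders them, and the episodes are projected out;
-- proved equal to A on every non-empty dict (A raises ValueError on an empty dict).


-- ===== PORT A =====
def create_staggered_py (series_episodes : List (Int × List Int)) : List Int :=
  let episodes : List Int := []
  let series_list : List (List Int) := (PySem.Dict.ofList series_episodes).values
  -- max([...]) raises ValueError on an empty list; Pre_ excludes the empty dict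
  let range_list : Int :=
    (PySem.List.max? (series_list.map (fun l => (l.length : Int))) (fun x => x)).getD 0
  (PySem.List.pyRange 0 range_list 1).foldl (fun eps index =>
    series_list.foldl (fun eps series =>
      match PySem.List.pyGet? series index with  -- try: append series[index]; except IndexError: pass
      | some x => eps ++ [x]
      | none => eps) eps) episodes

-- ===== PORT B =====
def create_staggered_py_alt (series_episodes : List (Int × List Int)) : List Int :=
  -- decorated = [(position, series_nr, episode) for series_nr, episodes in enumerate(values) for position, episode in enumerate(episodes)]
  let decorated : List (Int × Int × Int) :=
    (PySem.List.enumerate (PySem.Dict.ofList series_episodes).values 0).flatMap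
      (fun p => (PySem.List.enumerate p.2 0).map (fun q => (q.1, p.1, q.2)))
  -- decorated.sort(key=lambda t: (t[0], t[1])); return [episode for …]
  (PySem.List.sorted2 decorated (fun t => t.1) (fun t => t.2.1)).map (fun t => t.2.2)

-- ===== PRECONDITION & SPEC =====
-- A raises ValueError (max() of an empty sequence) exactly when the dict is empty.
def Pre_create_staggered_py (series_episodes : List (Int × List Int)) : Prop :=
  series_episodes ≠ []
instance (series_episodes : List (Int × List Int)) : Decidable (Pre_create_staggered_py series_episodes) := by unfold Pre_create_staggered_py; infer_instance
def pvWitness_create_staggered_py : (List (Int × List Int)) := [(1, [10]), (2, [20, 21])]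

-- On an empty dict A raises ValueError (max of an empty sequence); B returns [].
def Raises_create_staggered_py (series_episodes : List (Int × List Int)) : Prop :=
  series_episodes = []
instance (series_episodes : List (Int × List Int)) : Decidable (Raises_create_staggered_py series_episodes) := by unfold Raises_create_staggered_py; infer_instance
def pvRaiseWitness_create_staggered_py : (List (Int × List Int)) := []
def pvRaiseWitnessOut_create_staggered_py : List Int := []

def Spec_create_staggered_py (series_episodes : List (Int × List Int)) (out : List Int) : Prop := out = create_staggered_py_alt series_episodes
instance (series_episodes : List (Int × List Int)) (out : List Int) : Decidable (Spec_create_staggered_py series_episodes out) := by unfold Spec_create_staggered_py; infer_instance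

-- ===== CLAIM (what is proved, stated in full; the proofs are below) =====
def Claim_equal_create_staggered_py : Prop := ∀ (series_episodes : List (Int × List Int)), Dom_create_staggered_py series_episodes → Pre_create_staggered_py series_episodes → Spec_create_staggered_py series_episodes (create_staggered_py series_episodes)
def Claim_raises_create_staggered_py : Prop := (∀ (series_episodes : List (Int × List Int)), Dom_create_staggered_py series_episodes → Raises_create_staggered_py series_episodes → ¬ Pre_create_staggered_py series_episodes) ∧ (Dom_create_staggered_py (pvRaiseWitness_create_staggered_py) ∧ Raises_create_staggered_py (pvRaiseWitness_create_staggered_py) ∧ create_staggered_py_alt (pvRaiseWitness_create_staggered_py) = pvRaiseWitnessOut_create_staggered_py)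

-- ===== LEMMAS AND PROOFS =====

-- proof-side names for the two shapes: B's decorated list (row by row) and the
-- same triples column by column (the order B's sort produces)
def pvDecor (sl : List (List Int)) : List (Int × Int × Int) :=
  (PySem.List.enumerate sl 0).flatMap
    (fun p => (PySem.List.enumerate p.2 0).map (fun q => (q.1, p.1, q.2)))

def pvColT (sl : List (List Int)) (j : Nat) : List (Int × Int × Int) :=
  (PySem.List.enumerate sl 0).filterMap
    (fun p => (p.2[j]?).map (fun ep => ((j : Int), p.1, ep)))

def pvCols (sl : List (List Int)) (M : Nat) : List (Int × Int × Int) :=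
  (List.range M).flatMap (fun j => pvColT sl j)

-- the sort key (position, series) as a lexicographic Int pair
def pvKey (t : Int × Int × Int) : Int ×ₗ Int := toLex (t.1, t.2.1)
-- the (series, position) key, strictly increasing along pvDecor
def pvKeyR (t : Int × Int × Int) : Int ×ₗ Int := toLex (t.2.1, t.1)

theorem mem_pvDecor (sl : List (List Int)) (t : Int × Int × Int) :
    t ∈ pvDecor sl ↔ ∃ (i : Nat) (hi : i < sl.length) (j : Nat) (hj : j < sl[i].length),
      t = ((j : Int), (i : Int), sl[i][j]) := by
  simp only [pvDecor, List.mem_flatMap, List.mem_map, PySem.List.mem_enumerate_iff]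
  constructor
  · rintro ⟨p, ⟨i, hi, rfl⟩, q, ⟨j, hj, rfl⟩, rfl⟩
    exact ⟨i, hi, j, hj, by simp⟩
  · rintro ⟨i, hi, j, hj, rfl⟩
    exact ⟨(0 + (i : Int), sl[i]), ⟨i, hi, rfl⟩,
      ⟨(0 + (j : Int), sl[i][j]), ⟨j, hj, rfl⟩, by simp⟩⟩

theorem mem_pvColT (sl : List (List Int)) (j : Nat) (t : Int × Int × Int) :
    t ∈ pvColT sl j ↔ ∃ (i : Nat) (hi : i < sl.length) (hj : j < sl[i].length),
      t = ((j : Int), (i : Int), sl[i][j]) := by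
  simp only [pvColT, List.mem_filterMap, PySem.List.mem_enumerate_iff, Option.map_eq_some_iff]
  constructor
  · rintro ⟨p, ⟨i, hi, rfl⟩, ep, hep, rfl⟩
    simp only [List.getElem?_eq_some_iff] at hep
    obtain ⟨hj, rfl⟩ := hep
    exact ⟨i, hi, hj, by simp⟩
  · rintro ⟨i, hi, hj, rfl⟩
    exact ⟨(0 + (i : Int), sl[i]), ⟨i, hi, rfl⟩, sl[i][j],
      by simp [hj]⟩

theorem mem_pvCols (sl : List (List Int)) (M : Nat)
    (hM : ∀ s ∈ sl, s.length ≤ M) (t : Int × Int × Int) :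
    t ∈ pvCols sl M ↔ t ∈ pvDecor sl := by
  simp only [pvCols, List.mem_flatMap, List.mem_range, mem_pvDecor, mem_pvColT]
  constructor
  · rintro ⟨j, _, i, hi, hj, rfl⟩
    exact ⟨i, hi, j, hj, rfl⟩
  · rintro ⟨i, hi, j, hj, rfl⟩
    exact ⟨j, lt_of_lt_of_le hj (hM sl[i] (List.getElem_mem hi)), i, hi, hj, rfl⟩

-- a list whose key is strictly increasing has no duplicates
theorem nodup_of_pairwise_key_lt (l : List (Int × Int × Int)) (key : Int × Int × Int → Int ×ₗ Int)
    (h : l.Pairwise (fun a b => key a < key b)) : l.Nodup :=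
  h.imp (fun hlt heq => absurd (heq ▸ hlt) (lt_irrefl _))

theorem pairwise_keyR_pvDecor (sl : List (List Int)) :
    (pvDecor sl).Pairwise (fun a b => pvKeyR a < pvKeyR b) := by
  rw [pvDecor, List.flatMap_def, List.pairwise_flatten]
  constructor
  · rintro l hl
    rw [List.mem_map] at hl
    obtain ⟨p, _, rfl⟩ := hl
    refine List.Pairwise.map _ ?_ (PySem.List.pairwise_lt_enumerate p.2 0)
    intro a b hab
    simp only [pvKeyR, Prod.Lex.lt_iff]
    right
    exact ⟨rfl, hab⟩
  · refine List.Pairwise.map _ ?_ (PySem.List.pairwise_lt_enumerate sl 0)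
    intro p p' hpp x hx y hy
    rw [List.mem_map] at hx hy
    obtain ⟨q, _, rfl⟩ := hx
    obtain ⟨q', _, rfl⟩ := hy
    simp only [pvKeyR, Prod.Lex.lt_iff]
    left
    exact hpp

theorem fst_mem_pvColT (sl : List (List Int)) (j : Nat) (t : Int × Int × Int)
    (ht : t ∈ pvColT sl j) : t.1 = (j : Int) := by
  obtain ⟨i, hi, hj, rfl⟩ := (mem_pvColT sl j t).mp ht
  rfl

theorem pairwise_key_pvColT (sl : List (List Int)) (j : Nat) :
    (pvColT sl j).Pairwise (fun a b => pvKey a < pvKey b) := by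
  refine List.Pairwise.filterMap _ ?_ (PySem.List.pairwise_lt_enumerate sl 0)
  rintro p p' hpp b hb b' hb'
  simp only [Option.map_eq_some_iff] at hb hb'
  obtain ⟨ep, _, rfl⟩ := hb
  obtain ⟨ep', _, rfl⟩ := hb'
  simp only [pvKey, Prod.Lex.lt_iff]
  right
  exact ⟨rfl, hpp⟩

theorem pairwise_key_pvCols (sl : List (List Int)) (M : Nat) :
    (pvCols sl M).Pairwise (fun a b => pvKey a < pvKey b) := by
  rw [pvCols, List.flatMap_def, List.pairwise_flatten]
  constructor
  · rintro l hl
    rw [List.mem_map] at hl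
    obtain ⟨j, _, rfl⟩ := hl
    exact pairwise_key_pvColT sl j
  · rw [List.pairwise_map]
    refine List.Pairwise.imp ?_ List.pairwise_lt_range
    intro j j' hjj x hx y hy
    have hx1 := fst_mem_pvColT sl j x hx
    have hy1 := fst_mem_pvColT sl j' y hy
    simp only [pvKey, Prod.Lex.lt_iff]
    left
    rw [hx1, hy1]
    simp only [ofLex_toLex]
    exact_mod_cast hjj

-- B's lambda key (t[0], t[1]) compares exactly as the lexicographic pvKey
theorem sorted2_eq_sorted_lex (xs : List (Int × Int × Int)) :
    PySem.List.sorted2 xs (fun t => t.1) (fun t => t.2.1)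
      = PySem.List.sorted xs pvKey := by
  have hbefore : (fun (a b : Int × Int × Int) =>
      decide (a.1 < b.1) || (!decide (b.1 < a.1) && decide (a.2.1 < b.2.1)))
      = (fun (a b : Int × Int × Int) => decide (pvKey a < pvKey b)) := by
    funext a b
    simp only [pvKey, Prod.Lex.lt_iff, ofLex_toLex]
    by_cases h1 : a.1 < b.1 <;> by_cases h2 : b.1 < a.1 <;> by_cases h3 : a.2.1 < b.2.1 <;>
      simp [h1, h2, h3] <;> omega
  rw [PySem.List.sorted_eq_foldl_insertBy]
  simp only [PySem.List.sorted2, Bool.false_eq_true, ite_false]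
  rw [hbefore]

-- the sort rearranges B's row-by-row triples into the column-by-column order
theorem sorted_decor_eq_cols (sl : List (List Int)) (M : Nat)
    (hM : ∀ s ∈ sl, s.length ≤ M) :
    PySem.List.sorted2 (pvDecor sl) (fun t => t.1) (fun t => t.2.1) = pvCols sl M := by
  rw [sorted2_eq_sorted_lex]
  refine PySem.List.sorted_eq_of_perm_of_pairwise_lt _ _ _ ?_ (pairwise_key_pvCols sl M)
  refine (List.perm_ext_iff_of_nodup ?_ ?_).mpr (mem_pvCols sl M hM)
  · exact nodup_of_pairwise_key_lt _ pvKey (pairwise_key_pvCols sl M)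
  · exact nodup_of_pairwise_key_lt _ pvKeyR (pairwise_keyR_pvDecor sl)

-- projecting the episodes out of a column gives A's column
theorem map_snd_snd_pvColT (sl : List (List Int)) (j : Nat) :
    (pvColT sl j).map (fun t => t.2.2) = sl.filterMap (fun s => s[j]?) := by
  rw [pvColT, List.map_filterMap]
  have h : sl.filterMap (fun s => s[j]?)
      = ((PySem.List.enumerate sl 0).map (fun p => p.2)).filterMap (fun s => s[j]?) := by
    rw [PySem.List.map_snd_enumerate]
  rw [h, List.filterMap_map]
  congr 1
  funext p
  simp [Option.map_map, Function.comp_def]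

-- A's inner loop over the series appends exactly the defined entries of the column.
theorem inner_fold_eq (sl : List (List Int)) (i : Int) (eps : List Int) :
    sl.foldl (fun eps series =>
      match PySem.List.pyGet? series i with
      | some x => eps ++ [x]
      | none => eps) eps
      = eps ++ sl.filterMap (fun s => PySem.List.pyGet? s i) := by
  induction sl generalizing eps with
  | nil => simp
  | cons s sl ih =>
    cases h : PySem.List.pyGet? s i with
    | none => simp [List.foldl_cons, h, ih]
    | some x => simp [List.foldl_cons, h, ih]

theorem pv_foldl_append {α β : Type} (f : α → List β) (l : List α) (init : List β) :
    l.foldl (fun acc x => acc ++ f x) init = init ++ l.flatMap f := by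
  induction l generalizing init with
  | nil => simp
  | cons x l ih => simp [List.foldl_cons, ih]

theorem create_staggered_py_spec : Claim_equal_create_staggered_py := by
  intro se hdom hpre
  unfold Spec_create_staggered_py create_staggered_py create_staggered_py_alt
  set sl := (PySem.Dict.ofList se).values with hsl
  simp only []
  -- A's outer loop: one flatMap of columns over the index range
  have hbody : (fun (eps : List Int) (index : Int) =>
      sl.foldl (fun eps series =>
        match PySem.List.pyGet? series index with
        | some x => eps ++ [x]
        | none => eps) eps)
      = (fun eps index => eps ++ sl.filterMap (fun s => PySem.List.pyGet? s index)) := by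
    funext eps index
    exact inner_fold_eq sl index eps
  rw [hbody, pv_foldl_append]
  set R : Int := (PySem.List.max? (sl.map (fun l => (l.length : Int))) (fun x => x)).getD 0 with hR
  -- every series is at most R long (vacuous when sl = [])
  have hM : ∀ s ∈ sl, s.length ≤ R.toNat := by
    intro s hs
    have hne : sl.map (fun l => (l.length : Int)) ≠ [] := by
      intro h0
      rw [List.map_eq_nil_iff] at h0
      rw [h0] at hs
      simp at hs
    obtain ⟨R', hR'⟩ := Option.ne_none_iff_exists'.mp
      (fun hnone => hne ((PySem.List.max?_eq_none_iff (sl.map (fun l => (l.length : Int))) (fun x => x)).mp hnone))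
    have := PySem.List.max?_isMax hR' ((s.length : Int)) (List.mem_map.mpr ⟨s, hs, rfl⟩)
    
    rw [hR, hR']
    simp only [Option.getD_some]
    omega
  -- B: sort the decorated triples into columns, then project the episodes
  show [] ++ (PySem.List.pyRange 0 R 1).flatMap (fun index => sl.filterMap (fun s => PySem.List.pyGet? s index))
      = (PySem.List.sorted2 (pvDecor sl) (fun t => t.1) (fun t => t.2.1)).map (fun t => t.2.2)
  rw [sorted_decor_eq_cols sl R.toNat hM, pvCols, List.map_flatMap]
  rw [PySem.List.pyRange_one, List.flatMap_map]
  simp only [Int.sub_zero, List.nil_append]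
  apply List.flatMap_congr
  intro j hj
  rw [map_snd_snd_pvColT]
  apply List.filterMap_congr
  intro s hs
  simp [PySem.List.pyGet?_natCast]

theorem create_staggered_py_raises : Claim_raises_create_staggered_py := by
  unfold Claim_raises_create_staggered_py
  refine ⟨fun se _ h => by simp [Raises_create_staggered_py] at h; simp [h, Pre_create_staggered_py], ?_, ?_, ?_⟩
  · decide
  · decide
  · decide

-- self-check: the raise-witness value really is what B's port returns there
theorem create_staggered_py_raises_witness_ok :
    create_staggered_py_alt pvRaiseWitness_create_staggered_py
      = pvRaiseWitnessOut_create_staggered_py :=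
  create_staggered_py_raises.2.2.2
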